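-- pv_equiv track=rewrite | github.com/WarmingUp-CodingTest/codingtest-python | yujin0124/250505/7490_gold5.py | calculation
-- ===== SOURCE A (Python) =====
-- def calculation(mark, numbers):
--     new_numbers = []
--     current_number = str(numbers[0])
--
--     for i in range(len(mark)):
--         if mark[i] == ' ':
--             current_number += str(numbers[i+1])
--         else:
--             new_numbers.append(int(current_number))
--             current_number = str(numbers[i+1])
--     new_numbers.append(int(current_number))
--
--     result = new_numbers[0]
--     index = 0
--
--     for i in range(1, len(new_numbers)):
--         while index < len(mark) and mark[index] == ' ':
--             index += 1
--
--         if index < len(mark):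
--             if mark[index] == '+':
--                 result += new_numbers[i]
--             else:
--                 result -= new_numbers[i]
--             index += 1
--
--     return result
-- ===== SOURCE B (Python) =====
-- def calculation(mark, numbers):
--     current = str(numbers[0])
--     result = 0
--     sign = 1
--     for i in range(len(mark)):
--         if mark[i] == ' ':
--             current += str(numbers[i + 1])
--         else:
--             result += sign * int(current)
--             sign = 1 if mark[i] == '+' else -1
--             current = str(numbers[i + 1])
--     return result + sign * int(current)
-- ===== Notes on version B (the rewrite author's own statement) =====
-- stated objective: simpler
-- what changed: Fused A's two passes (build a list of concatenated-segment values, then a second space-skipping index scan over mark) into one left-to-right pass with a running result and a sign, eliminating the intermediate new_numbers list and the index/while scan.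
import Mathlib
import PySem

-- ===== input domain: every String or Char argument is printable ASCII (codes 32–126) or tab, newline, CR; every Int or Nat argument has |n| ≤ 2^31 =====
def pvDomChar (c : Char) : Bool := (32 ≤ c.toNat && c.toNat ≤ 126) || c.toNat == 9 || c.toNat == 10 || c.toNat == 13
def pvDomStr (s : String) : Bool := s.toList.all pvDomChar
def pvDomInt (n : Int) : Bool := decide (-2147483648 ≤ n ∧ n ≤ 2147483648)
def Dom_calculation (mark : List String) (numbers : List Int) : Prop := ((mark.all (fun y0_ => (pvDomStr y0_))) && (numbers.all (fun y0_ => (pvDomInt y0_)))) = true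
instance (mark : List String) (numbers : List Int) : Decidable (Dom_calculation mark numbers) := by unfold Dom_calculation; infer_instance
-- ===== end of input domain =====

-- B fuses A's two passes (segment-list build + space-skipping scan) into one
-- left-to-right pass with a running result and sign (objective: simpler).

-- ===== PORT A =====
-- int(s): Python raises ValueError where ofStr? is none; Pre_ excludes those inputs, the 0 default is never reached there.
def pvParse (s : String) : Int := (PySem.Int.ofStr? s).getD 0

-- first loop of A: build new_numbers. `rest` is the not-yet-consumed tail of `numbers`
-- (numbers[i+1] = rest.head; out of range = Python IndexError, excluded by Pre_).
def pvPass1 (mark : List String) (rest : List Int) (current : String) : List Int :=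
  match mark with
  | [] => [pvParse current]
  | m :: ms =>
    let n := (rest.head?).getD 0
    if m == " " then pvPass1 ms rest.tail (current ++ PySem.Int.toStr n)
    else pvParse current :: pvPass1 ms rest.tail (PySem.Int.toStr n)

-- second loop of A: `result` accumulates, the `while` space-skip is dropWhile on the remaining marks.
def pvPass2 (nums : List Int) (ops : List String) (result : Int) : Int :=
  match nums with
  | [] => result
  | v :: vs =>
    match ops.dropWhile (fun o => o == " ") with
    | [] => pvPass2 vs [] result
    | op :: ops' => pvPass2 vs ops' (if op == "+" then result + v else result - v)

def calculation (mark : List String) (numbers : List Int) : Int :=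
  match pvPass1 mark numbers.tail (PySem.Int.toStr ((numbers.head?).getD 0)) with
  | [] => 0  -- unreachable: pvPass1 always returns a nonempty list (new_numbers[0] exists)
  | v :: vs => pvPass2 vs mark v

-- ===== PORT B =====
def pvAltGo (mark : List String) (rest : List Int) (current : String) (result sign : Int) : Int :=
  match mark with
  | [] => result + sign * pvParse current
  | m :: ms =>
    let n := (rest.head?).getD 0
    if m == " " then pvAltGo ms rest.tail (current ++ PySem.Int.toStr n) result sign
    else pvAltGo ms rest.tail (PySem.Int.toStr n) (result + sign * pvParse current)
           (if m == "+" then 1 else -1)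

def calculation_alt (mark : List String) (numbers : List Int) : Int :=
  pvAltGo mark numbers.tail (PySem.Int.toStr ((numbers.head?).getD 0)) 0 1

-- ===== PRECONDITION & SPEC =====
-- Pre_ excludes exactly the inputs where Python A raises: numbers shorter than len(mark)+1
-- (IndexError at numbers[i+1] or numbers[0]), and a negative number continuing a
-- space-joined segment, where int(current) gets a string with an interior '-' (ValueError).
def Pre_calculation (mark : List String) (numbers : List Int) : Prop :=
  mark.length + 1 ≤ numbers.length ∧
  ∀ i, i < mark.length → mark.getD i "" = " " → 0 ≤ numbers.getD (i + 1) 0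
instance (mark : List String) (numbers : List Int) : Decidable (Pre_calculation mark numbers) := by
  unfold Pre_calculation; infer_instance
def pvWitness_calculation : List String × List Int := (["+", " ", "-"], [1, 2, 3, 4])

def Spec_calculation (mark : List String) (numbers : List Int) (out : Int) : Prop := out = calculation_alt mark numbers
instance (mark : List String) (numbers : List Int) (out : Int) : Decidable (Spec_calculation mark numbers out) := by unfold Spec_calculation; infer_instance

-- ===== CLAIM (what is proved, stated in full; the proofs are below) =====
def Claim_equal_calculation : Prop := ∀ (mark : List String) (numbers : List Int), Dom_calculation mark numbers → Pre_calculation mark numbers → Spec_calculation mark numbers (calculation mark numbers)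

-- ===== LEMMAS AND PROOFS =====

-- combined form of A
def pvAcomb (mark : List String) (rest : List Int) (current : String) : Int :=
  match pvPass1 mark rest current with
  | [] => 0
  | v :: vs => pvPass2 vs mark v

theorem pvPass1_ne_nil (mark : List String) (rest : List Int) (current : String) :
    pvPass1 mark rest current ≠ [] := by
  cases mark with
  | nil => simp [pvPass1]
  | cons m ms =>
    unfold pvPass1
    split
    · exact pvPass1_ne_nil _ _ _
    · simp

-- a leading space in ops is skipped by the dropWhile at every step
theorem pvPass2_space (vs : List Int) (ms : List String) (r : Int) :
    pvPass2 vs (" " :: ms) r = pvPass2 vs ms r := by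
  cases vs with
  | nil => simp [pvPass2]
  | cons v vs' =>
    unfold pvPass2
    simp [List.dropWhile]

-- accumulator linearity of the second pass
theorem pvPass2_shift (vs : List Int) (ops : List String) (c r : Int) :
    pvPass2 vs ops (c + r) = c + pvPass2 vs ops r := by
  induction vs generalizing ops r with
  | nil => simp [pvPass2]
  | cons v vs' ih =>
    unfold pvPass2
    split
    · exact ih _ _
    · split <;> [rw [add_assoc]; rw [add_sub_assoc]] <;> exact ih _ _

-- the core invariant: B's one-pass state equals A's remaining computation
theorem pvPass1_cons (m : String) (ms : List String) (rest : List Int) (current : String) :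
    pvPass1 (m :: ms) rest current =
      if m == " " then pvPass1 ms rest.tail (current ++ PySem.Int.toStr ((rest.head?).getD 0))
      else pvParse current :: pvPass1 ms rest.tail (PySem.Int.toStr ((rest.head?).getD 0)) := rfl

theorem pvAltGo_cons (m : String) (ms : List String) (rest : List Int) (current : String)
    (result sign : Int) :
    pvAltGo (m :: ms) rest current result sign =
      if m == " " then
        pvAltGo ms rest.tail (current ++ PySem.Int.toStr ((rest.head?).getD 0)) result sign
      else
        pvAltGo ms rest.tail (PySem.Int.toStr ((rest.head?).getD 0))
          (result + sign * pvParse current) (if m == "+" then 1 else -1) := rfl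

theorem pvPass2_cons_op (v : Int) (vs : List Int) (op : String) (ops' : List String) (r : Int)
    (h : (op == " ") = false) :
    pvPass2 (v :: vs) (op :: ops') r
      = pvPass2 vs ops' (if op == "+" then r + v else r - v) := by
  have hd : List.dropWhile (fun o => o == " ") (op :: ops') = op :: ops' := by
    rw [List.dropWhile_cons, if_neg (by simp [h])]
  show (match (op :: ops').dropWhile (fun o => o == " ") with
      | [] => pvPass2 vs [] r
      | o :: os => pvPass2 vs os (if o == "+" then r + v else r - v))
    = pvPass2 vs ops' (if op == "+" then r + v else r - v)
  rw [hd]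

theorem pvAcomb_cons_space (ms : List String) (rest : List Int) (current : String) :
    pvAcomb (" " :: ms) rest current
      = pvAcomb ms rest.tail (current ++ PySem.Int.toStr ((rest.head?).getD 0)) := by
  unfold pvAcomb
  rw [pvPass1_cons, if_pos (by decide : ((" " : String) == " ") = true)]
  rcases hE : pvPass1 ms rest.tail (current ++ PySem.Int.toStr ((rest.head?).getD 0)) with _ | ⟨v, vs⟩
  · exact absurd hE (pvPass1_ne_nil _ _ _)
  · exact pvPass2_space vs ms v

theorem pvAcomb_cons_op (m : String) (ms : List String) (rest : List Int) (current : String)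
    (hm : (m == " ") = false) :
    pvAcomb (m :: ms) rest current
      = pvPass2 (pvPass1 ms rest.tail (PySem.Int.toStr ((rest.head?).getD 0))) (m :: ms)
          (pvParse current) := by
  unfold pvAcomb
  rw [pvPass1_cons, if_neg (by simp [hm])]

theorem pvAltGo_eq (mark : List String) (rest : List Int) (current : String)
    (result sign : Int) :
    pvAltGo mark rest current result sign =
      result + sign * (pvPass1 mark rest current).headD 0 +
        (pvAcomb mark rest current - (pvPass1 mark rest current).headD 0) := by
  induction mark generalizing rest current result sign with
  | nil => simp [pvAltGo, pvPass1, pvAcomb, pvPass2]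
  | cons m ms ih =>
    by_cases hm : (m == " ") = true
    · have hms : m = " " := by simpa using hm
      subst hms
      rw [pvAltGo_cons, pvPass1_cons, if_pos (by decide : ((" " : String) == " ") = true),
          if_pos (by decide : ((" " : String) == " ") = true), pvAcomb_cons_space]
      exact ih _ _ _ _
    · have hm' : (m == " ") = false := by simpa using hm
      rw [pvAltGo_cons, pvPass1_cons, if_neg hm, if_neg hm,
          pvAcomb_cons_op m ms rest current hm', ih]
      rcases hE : pvPass1 ms rest.tail (PySem.Int.toStr ((rest.head?).getD 0)) with _ | ⟨v, vs⟩
      · exact absurd hE (pvPass1_ne_nil _ _ _)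
      · have hAc : pvAcomb ms rest.tail (PySem.Int.toStr ((rest.head?).getD 0))
            = pvPass2 vs ms v := by
          unfold pvAcomb
          rw [hE]
        have key : ∀ c : Int, pvPass2 vs ms c = (c - v) + pvPass2 vs ms v := by
          intro c
          conv_lhs => rw [show c = (c - v) + v by ring]
          exact pvPass2_shift vs ms (c - v) v
        rw [hAc, pvPass2_cons_op v vs m ms (pvParse current) hm',
            key (if (m == "+") = true then pvParse current + v else pvParse current - v)]
        simp only [List.headD_cons]
        by_cases hp : (m == "+") = true
        · rw [if_pos hp, if_pos hp]
          ring
        · rw [if_neg hp, if_neg hp]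
          ring

theorem calc_eq (mark : List String) (numbers : List Int) :
    calculation mark numbers = calculation_alt mark numbers := by
  unfold calculation calculation_alt
  rw [pvAltGo_eq]
  rcases hE : pvPass1 mark numbers.tail (PySem.Int.toStr ((numbers.head?).getD 0)) with _ | ⟨v, vs⟩
  · exact absurd hE (pvPass1_ne_nil _ _ _)
  · have hAc : pvAcomb mark numbers.tail (PySem.Int.toStr ((numbers.head?).getD 0))
        = pvPass2 vs mark v := by
      unfold pvAcomb
      rw [hE]
    rw [hAc]
    show pvPass2 vs mark v = 0 + 1 * (v :: vs).headD 0 + (pvPass2 vs mark v - (v :: vs).headD 0)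
    simp only [List.headD_cons]
    ring

-- ===== VERDICT (by name: the statement is the Claim_ definition above) =====
theorem calculation_spec : Claim_equal_calculation := by
  intro mark numbers _ _
  unfold Spec_calculation
  exact calc_eq mark numbers
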